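-- pv_equiv track=rewrite | github.com/jyjang1222/learning-python | py-L-function/함수3_문제_리턴/함수3_문제6_차집합함수.py | getListNotDuplicatedValue
-- ===== SOURCE A (Python) =====
-- def getListNotDuplicatedValue(arr1, arr2):
-- 	tmp = []
-- 	for i in arr1:
-- 		# 겹치는지체크
-- 		chk = True
-- 		for j in arr2:
-- 			if i == j:
-- 				chk = False
-- 		if chk:
-- 			# 저장할값 중복체크
-- 			chk2 = True
-- 			for k in tmp:
-- 				if i == k:
-- 					chk2 = False
-- 			if chk2:
-- 				tmp.append(i)
-- 	return tmp
-- ===== SOURCE B (Python) =====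
-- def getListNotDuplicatedValue(arr1, arr2):
--     # Successive-elimination: repeatedly take the first remaining element,
--     # emit it unless it occurs in arr2, and delete all its copies from the
--     # remainder; no "seen" accumulator is ever consulted.
--     out = []
--     rest = arr1
--     while rest:
--         h = rest[0]
--         if h not in arr2:
--             out.append(h)
--         rest = [x for x in rest[1:] if x != h]
--     return out
-- ===== Notes on version B (the rewrite author's own statement) =====
-- stated objective: alternative
-- what changed: Replaced A's seen-accumulator scan (flag loops over arr2 and over the growing tmp) by a successive-elimination loop that takes the first remaining element, emits it if absent from arr2, and deletes all its later copies from the remainder, so no membership test against the output is ever made.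
import Mathlib
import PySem

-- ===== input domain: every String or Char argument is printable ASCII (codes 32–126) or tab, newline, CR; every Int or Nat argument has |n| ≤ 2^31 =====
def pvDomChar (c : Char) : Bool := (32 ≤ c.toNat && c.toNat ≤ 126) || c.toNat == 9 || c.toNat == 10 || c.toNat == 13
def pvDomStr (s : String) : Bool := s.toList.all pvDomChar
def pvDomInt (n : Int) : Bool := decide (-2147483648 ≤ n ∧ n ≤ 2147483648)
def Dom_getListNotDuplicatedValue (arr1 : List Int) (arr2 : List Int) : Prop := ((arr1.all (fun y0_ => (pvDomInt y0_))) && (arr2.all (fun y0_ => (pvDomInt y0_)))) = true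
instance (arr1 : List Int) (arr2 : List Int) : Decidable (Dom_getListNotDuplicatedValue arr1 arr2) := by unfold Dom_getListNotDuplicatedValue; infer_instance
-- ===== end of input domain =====

-- B replaces A's seen-accumulator triple scan by a successive-elimination loop (take head, emit unless in arr2, delete its copies from the remainder); alternative decomposition, no speed claim.


-- ===== PORT A =====
def getListNotDuplicatedValue (arr1 : List Int) (arr2 : List Int) : List Int :=
  arr1.foldl (fun tmp i =>
    -- chk: the flag loop over arr2
    let chk := arr2.foldl (fun chk j => if i == j then false else chk) true
    if chk then
      -- chk2: the flag loop over tmp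
      let chk2 := tmp.foldl (fun chk2 k => if i == k then false else chk2) true
      if chk2 then tmp ++ [i] else tmp
    else tmp) []

-- ===== PORT B =====
-- Source B's while loop: out/rest state; take head, emit unless in arr2, strip its copies.
def pvAltLoop (arr2 : List Int) : List Int → List Int → List Int
  | out, [] => out
  | out, h :: t =>
      pvAltLoop arr2 (if arr2.contains h then out else out ++ [h]) (t.filter (fun x => x ≠ h))
  termination_by _ rest => rest.length
  decreasing_by
    simp only [List.length_cons, List.length_unattach]
    exact Nat.lt_succ_of_le (le_trans (List.length_filter_le _ _) (by simp))

def getListNotDuplicatedValue_alt (arr1 : List Int) (arr2 : List Int) : List Int :=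
  pvAltLoop arr2 [] arr1

-- ===== PRECONDITION & SPEC =====
def Spec_getListNotDuplicatedValue (arr1 : List Int) (arr2 : List Int) (out : List Int) : Prop := out = getListNotDuplicatedValue_alt arr1 arr2
instance (arr1 : List Int) (arr2 : List Int) (out : List Int) : Decidable (Spec_getListNotDuplicatedValue arr1 arr2 out) := by unfold Spec_getListNotDuplicatedValue; infer_instance

-- ===== CLAIM (what is proved, stated in full; the proofs are below) =====
def Claim_equal_getListNotDuplicatedValue : Prop := ∀ (arr1 : List Int) (arr2 : List Int), Dom_getListNotDuplicatedValue arr1 arr2 → Spec_getListNotDuplicatedValue arr1 arr2 (getListNotDuplicatedValue arr1 arr2)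

-- ===== LEMMAS AND PROOFS =====

-- Head-strip dedup: the common normal form both programs compute (proof-only helper).
def pvRecDedup : List Int → List Int
  | [] => []
  | h :: t => h :: pvRecDedup (t.filter (fun x => x ≠ h))
  termination_by l => l.length
  decreasing_by
    simp only [List.length_cons, List.length_unattach]
    exact Nat.lt_succ_of_le (le_trans (List.length_filter_le _ _) (by simp))

-- A's inner flag loop is a negated membership test.
lemma flag_loop (i : Int) (l : List Int) (b : Bool) :
    l.foldl (fun c j => if i == j then false else c) b = (b && !l.contains i) := by
  induction l generalizing b with
  | nil => simp
  | cons x xs ih =>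
      rw [List.foldl_cons, ih, List.contains_cons]
      by_cases h : i = x
      · subst h; simp
      · have hx : (i == x) = false := beq_eq_false_iff_ne.mpr h
        simp [hx]

-- Filtering by "not in arr2" does not change membership of an element outside arr2.
lemma mem_filter_not (arr2 acc : List Int) (i : Int) (hp : i ∉ arr2) :
    (acc.filter (fun x => !arr2.contains x)).contains i = acc.contains i := by
  simp only [List.contains_eq_mem, List.mem_filter]
  by_cases h : i ∈ acc <;> simp [h, hp]

-- One outer step of A from a filtered accumulator equals filtering one accumulator-dedup step.
lemma step_eq (arr2 acc : List Int) (i : Int) :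
    (let chk := arr2.foldl (fun chk j => if i == j then false else chk) true
     if chk then
       let chk2 := (acc.filter (fun x => !arr2.contains x)).foldl
           (fun chk2 k => if i == k then false else chk2) true
       if chk2 then acc.filter (fun x => !arr2.contains x) ++ [i]
       else acc.filter (fun x => !arr2.contains x)
     else acc.filter (fun x => !arr2.contains x))
    = (if acc.contains i then acc else acc ++ [i]).filter (fun x => !arr2.contains x) := by
  simp only [flag_loop, Bool.true_and]
  by_cases hp : i ∈ arr2
  · rw [if_neg (by simp [hp])]
    split_ifs with hc
    · rfl
    · simp [List.filter_append, hp]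
  · rw [if_pos (by simp [hp]), mem_filter_not arr2 acc i hp]
    split_ifs with hc <;> simp_all [List.filter_append]

-- Invariant: running A's outer loop from a filtered accumulator equals filtering the accumulator-dedup fold.
lemma fold_invariant (arr2 : List Int) :
    ∀ (arr1 acc : List Int),
      arr1.foldl (fun tmp i =>
        let chk := arr2.foldl (fun chk j => if i == j then false else chk) true
        if chk then
          let chk2 := tmp.foldl (fun chk2 k => if i == k then false else chk2) true
          if chk2 then tmp ++ [i] else tmp
        else tmp) (acc.filter (fun x => !arr2.contains x))
      = (arr1.foldl (fun acc x => if acc.contains x then acc else acc ++ [x]) acc).filter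
          (fun x => !arr2.contains x) := by
  intro arr1
  induction arr1 with
  | nil => intro acc; rfl
  | cons i rest ih =>
      intro acc
      rw [List.foldl_cons, List.foldl_cons, step_eq arr2 acc i]
      exact ih (if acc.contains i then acc else acc ++ [i])

-- Unfolding equations for the well-founded helpers.
lemma recDedup_nil : pvRecDedup [] = [] := by unfold pvRecDedup; rfl

lemma recDedup_cons (h : Int) (t : List Int) :
    pvRecDedup (h :: t) = h :: pvRecDedup (t.filter (fun x => x ≠ h)) := by
  conv_lhs => unfold pvRecDedup

lemma altLoop_nil (arr2 out : List Int) : pvAltLoop arr2 out [] = out := by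
  unfold pvAltLoop; rfl

lemma altLoop_cons (arr2 out : List Int) (h : Int) (t : List Int) :
    pvAltLoop arr2 out (h :: t)
    = pvAltLoop arr2 (if arr2.contains h then out else out ++ [h]) (t.filter (fun x => x ≠ h)) := by
  conv_lhs => unfold pvAltLoop

-- The accumulator-dedup fold equals head-strip dedup.
lemma dedupFold_eq_recDedup :
    ∀ (n : Nat) (l acc : List Int), l.length ≤ n →
      l.foldl (fun acc x => if acc.contains x then acc else acc ++ [x]) acc
      = acc ++ pvRecDedup (l.filter (fun x => !acc.contains x)) := by
  intro n
  induction n with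
  | zero =>
      intro l acc hl
      have : l = [] := List.eq_nil_of_length_eq_zero (Nat.le_zero.mp hl)
      subst this; simp [recDedup_nil]
  | succ n ih =>
      intro l acc hl
      cases l with
      | nil => simp [recDedup_nil]
      | cons h t =>
          have ht : t.length ≤ n := Nat.le_of_succ_le_succ (by simpa using hl)
          rw [List.foldl_cons]
          by_cases hm : h ∈ acc
          · rw [if_pos (by simpa using hm), ih t acc ht]
            simp [hm]
          · have hc : acc.contains h = false := by simpa using hm
            rw [if_neg (by simp [hm]), ih t (acc ++ [h]) ht]
            have hfil : t.filter (fun x => !(acc ++ [h]).contains x)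
                = (t.filter (fun x => !acc.contains x)).filter (fun x => x ≠ h) := by
              rw [List.filter_filter]
              apply List.filter_congr
              intro x _
              by_cases hx : x = h <;> simp [hx, hm]
            rw [hfil]
            simp [hm, recDedup_cons]

-- B's while loop computes out ++ the arr2-filter of the head-strip dedup.
lemma altLoop_eq :
    ∀ (n : Nat) (arr2 rest out : List Int), rest.length ≤ n →
      pvAltLoop arr2 out rest = out ++ (pvRecDedup rest).filter (fun x => !arr2.contains x) := by
  intro n
  induction n with
  | zero =>
      intro arr2 rest out hl
      have : rest = [] := List.eq_nil_of_length_eq_zero (Nat.le_zero.mp hl)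
      subst this; simp [altLoop_nil, recDedup_nil]
  | succ n ih =>
      intro arr2 rest out hl
      cases rest with
      | nil => simp [altLoop_nil, recDedup_nil]
      | cons h t =>
          have ht : (t.filter (fun x => x ≠ h)).length ≤ n :=
            le_trans (List.length_filter_le _ _) (Nat.le_of_succ_le_succ (by simpa using hl))
          rw [altLoop_cons, ih arr2 _ _ ht, recDedup_cons]
          by_cases hm : h ∈ arr2
          · simp [hm]
          · simp [hm]

-- ===== VERDICT (by name: the statement is the Claim_ definition above) =====
theorem getListNotDuplicatedValue_spec : Claim_equal_getListNotDuplicatedValue := by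
  intro arr1 arr2 _
  unfold Spec_getListNotDuplicatedValue getListNotDuplicatedValue getListNotDuplicatedValue_alt
  have hA := fold_invariant arr2 arr1 []
  simp only [List.filter_nil] at hA
  rw [hA, dedupFold_eq_recDedup arr1.length arr1 [] le_rfl,
      altLoop_eq arr1.length arr2 arr1 [] le_rfl]
  simp
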